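-- pv_equiv track=rewrite | github.com/GillesArcas/Advent_of_Code | 2023/14.py | tilt_col_west
-- ===== SOURCE A (Python) =====
-- def tilt_col_west(row):
--     s = ''.join(row)
--     while 1:
--         s2 = s.replace('.O', 'O.')
--         if s2 == s:
--             return list(s)
--         else:
--             s = s2
-- ===== SOURCE B (Python) =====
-- def tilt_col_west(row):
--     out = []
--     o = d = 0
--     for c in ''.join(row):
--         if c == 'O':
--             o += 1
--         elif c == '.':
--             d += 1
--         else:
--             out += ['O'] * o + ['.'] * d + [c]
--             o = d = 0
--     out += ['O'] * o + ['.'] * d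
--     return out
-- ===== Notes on version B (the rewrite author's own statement) =====
-- stated objective: alternative
-- what changed: Replaces the repeat-str.replace('.O','O.')-until-fixpoint loop by a single left-to-right pass that counts 'O's and '.'s between wall characters and emits each packed segment.
import Mathlib
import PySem

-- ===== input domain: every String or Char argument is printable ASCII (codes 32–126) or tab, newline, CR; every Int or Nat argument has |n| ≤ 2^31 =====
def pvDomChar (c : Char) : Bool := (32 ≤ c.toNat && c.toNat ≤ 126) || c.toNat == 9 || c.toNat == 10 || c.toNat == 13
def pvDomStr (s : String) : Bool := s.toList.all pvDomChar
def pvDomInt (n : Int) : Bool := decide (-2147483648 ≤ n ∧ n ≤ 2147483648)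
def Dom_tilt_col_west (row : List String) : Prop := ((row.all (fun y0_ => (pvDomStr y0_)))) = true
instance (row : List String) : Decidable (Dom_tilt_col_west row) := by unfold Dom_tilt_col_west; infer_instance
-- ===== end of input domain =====

-- B replaces A's repeat `s.replace('.O','O.')`-until-fixpoint loop by a single pass that
-- counts 'O'/'.' between walls and emits each packed segment (objective: alternative algorithm).

-- ===== PORT A =====
-- what one pass of s.replace('.O', 'O.') computes, on the character list
-- (needed to justify termination of A's while-loop)
def pvStep : List Char → List Char
  | [] => []
  | [c] => [c]
  | c :: c2 :: t => if c = '.' ∧ c2 = 'O' then 'O' :: '.' :: pvStep t else c :: pvStep (c2 :: t)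

-- termination measure for A's while-loop: the sum of the indices of the 'O's
def pvPot : List Char → Nat
  | [] => 0
  | _ :: t => pvPot t + t.countP (· == 'O')

theorem pvReplaceGo_eq_step (fuel : Nat) (l acc : List Char) (h : l.length ≤ fuel) :
    PySem.Chars.replace.go ['.', 'O'] ['O', '.'] fuel l acc = acc.reverse ++ pvStep l := by
  induction fuel generalizing l acc with
  | zero =>
    have hl : l = [] := List.eq_nil_of_length_eq_zero (Nat.le_zero.mp h)
    subst hl
    simp [PySem.Chars.replace.go, pvStep]
  | succ n ih =>
    match l with
    | [] => simp [PySem.Chars.replace.go, pvStep]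
    | c :: t =>
      rw [PySem.Chars.replace.go]
      by_cases hp : List.isPrefixOf ['.', 'O'] (c :: t)
      · simp only [hp, if_true]
        rcases List.isPrefixOf_iff_prefix.mp hp with ⟨r, hr⟩
        obtain ⟨hc, ht⟩ : '.' = c ∧ 'O' :: r = t := by simpa using hr
        subst hc; subst ht
        simp only [List.length_cons] at h
        rw [show List.drop (['.', 'O'].length) ('.' :: 'O' :: r) = r from rfl]
        rw [ih r _ (by omega)]
        simp [pvStep]
      · simp only [hp]
        have hstep : pvStep (c :: t) = c :: pvStep t := by
          cases t with
          | nil => rfl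
          | cons c2 t2 =>
            rw [pvStep, if_neg]
            rintro ⟨rfl, rfl⟩
            simp [List.isPrefixOf] at hp
        simp only [List.length_cons] at h
        rw [ih t (c :: acc) (by omega)]
        simp [hstep]

theorem pvReplace_eq_step (s : String) :
    (PySem.Str.replace s ".O" "O.").toList = pvStep s.toList := by
  rw [PySem.Str.toList_replace]
  show PySem.Chars.replace s.toList ".O".toList "O.".toList = pvStep s.toList
  rw [show ".O".toList = ['.', 'O'] from rfl, show "O.".toList = ['O', '.'] from rfl,
    PySem.Chars.replace]
  rw [if_neg (by simp)]
  exact pvReplaceGo_eq_step _ _ _ le_rfl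

theorem pvCountO_step (l : List Char) : (pvStep l).countP (· == 'O') = l.countP (· == 'O') := by
  induction l using pvStep.induct with
  | case1 => rfl
  | case2 c => rfl
  | case3 c c2 t h ih =>
    obtain ⟨rfl, rfl⟩ := h
    simp [pvStep, ih]
  | case4 c c2 t h ih =>
    simp only [pvStep, if_neg h, List.countP_cons, ih]

theorem pvPot_step_le (l : List Char) : pvPot (pvStep l) ≤ pvPot l := by
  induction l using pvStep.induct with
  | case1 => simp [pvStep]
  | case2 c => simp [pvStep]
  | case3 c c2 t h ih =>
    obtain ⟨rfl, rfl⟩ := h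
    simp [pvStep, pvPot, pvCountO_step]
    omega
  | case4 c c2 t h ih =>
    have ha : pvPot (c2 :: t) = pvPot t + List.countP (· == 'O') t := rfl
    simp only [pvStep, if_neg h, pvPot, pvCountO_step]
    omega

theorem pvPot_step_lt (l : List Char) (h : pvStep l ≠ l) : pvPot (pvStep l) < pvPot l := by
  induction l using pvStep.induct with
  | case1 => simp [pvStep] at h
  | case2 c => simp [pvStep] at h
  | case3 c c2 t hc ih =>
    obtain ⟨rfl, rfl⟩ := hc
    have hle := pvPot_step_le t
    simp [pvStep, pvPot, pvCountO_step]
    omega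
  | case4 c c2 t hc ih =>
    simp only [pvStep, if_neg hc] at h ⊢
    have h' : pvStep (c2 :: t) ≠ c2 :: t := fun he => h (by rw [he])
    have := ih h'
    have ha : pvPot (c2 :: t) = pvPot t + List.countP (· == 'O') t := rfl
    simp only [pvPot, pvCountO_step]
    omega

-- the while-loop of A, recursing on the decreasing measure pvPot
def pvLoopA (s : String) : List String :=
  let s2 := PySem.Str.replace s ".O" "O."
  if s2 = s then s.toList.map (fun c => String.singleton c)
  else pvLoopA s2
termination_by pvPot s.toList
decreasing_by
  rename_i hne
  rw [show pvPot (PySem.Str.replace s ".O" "O.").toList = pvPot (pvStep s.toList) by rw [pvReplace_eq_step]]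
  refine pvPot_step_lt _ (fun he => hne ?_)
  exact String.toList_inj.mp (by rw [pvReplace_eq_step, he])

def tilt_col_west (row : List String) : List String :=
  pvLoopA (PySem.Str.join "" row)

-- ===== PORT B =====
-- the for-loop of B: out, o, d are the accumulators; the base case is the final flush after the loop
def pvTiltAux (out : List String) (o d : Nat) : List Char → List String
  | [] => out ++ List.replicate o "O" ++ List.replicate d "."
  | c :: t =>
    if c = 'O' then pvTiltAux out (o + 1) d t
    else if c = '.' then pvTiltAux out o (d + 1) t
    else pvTiltAux (out ++ List.replicate o "O" ++ List.replicate d "." ++ [String.singleton c]) 0 0 t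

def tilt_col_west_alt (row : List String) : List String :=
  pvTiltAux [] 0 0 (PySem.Str.join "" row).toList

-- ===== PRECONDITION & SPEC =====
def Spec_tilt_col_west (row : List String) (out : List String) : Prop := out = tilt_col_west_alt row
instance (row : List String) (out : List String) : Decidable (Spec_tilt_col_west row out) := by unfold Spec_tilt_col_west; infer_instance

-- ===== CLAIM (what is proved, stated in full; the proofs are below) =====
def Claim_equal_tilt_col_west : Prop := ∀ (row : List String), Dom_tilt_col_west row → Spec_tilt_col_west row (tilt_col_west row)

-- ===== LEMMAS AND PROOFS =====

theorem pvSingO : String.singleton 'O' = "O" := rfl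
theorem pvSingD : String.singleton '.' = "." := rfl

-- one replace pass does not change B's packed result
theorem pvTiltAux_step (l : List Char) : ∀ out o d,
    pvTiltAux out o d (pvStep l) = pvTiltAux out o d l := by
  induction l using pvStep.induct with
  | case1 => intro out o d; rfl
  | case2 c => intro out o d; rfl
  | case3 c c2 t h ih =>
    obtain ⟨rfl, rfl⟩ := h
    intro out o d
    rw [show pvStep ('.' :: 'O' :: t) = 'O' :: '.' :: pvStep t from by rw [pvStep, if_pos ⟨rfl, rfl⟩]]
    show pvTiltAux out (o + 1) (d + 1) (pvStep t) = pvTiltAux out (o + 1) (d + 1) t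
    exact ih out (o + 1) (d + 1)
  | case4 c c2 t h ih =>
    intro out o d
    rw [show pvStep (c :: c2 :: t) = c :: pvStep (c2 :: t) from by rw [pvStep, if_neg h]]
    by_cases hO : c = 'O'
    · subst hO
      show pvTiltAux out (o + 1) d (pvStep (c2 :: t)) = pvTiltAux out (o + 1) d (c2 :: t)
      exact ih _ _ _
    · by_cases hD : c = '.'
      · subst hD
        show pvTiltAux out o (d + 1) (pvStep (c2 :: t)) = pvTiltAux out o (d + 1) (c2 :: t)
        exact ih _ _ _
      · rw [pvTiltAux, if_neg hO, if_neg hD,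
          show pvTiltAux out o d (c :: c2 :: t)
            = pvTiltAux (out ++ List.replicate o "O" ++ List.replicate d "." ++ [String.singleton c]) 0 0 (c2 :: t)
            from by rw [pvTiltAux, if_neg hO, if_neg hD]]
        exact ih _ _ _

-- on a fixpoint of the replace pass, B's packer is the identity (modulo the pending counters)
theorem pvTiltAux_fix : ∀ (l : List Char), pvStep l = l → ∀ (out : List String) (o d : Nat), (d = 0 ∨ l.head? ≠ some 'O') →
    pvTiltAux out o d l = out ++ List.replicate o "O" ++ List.replicate d "." ++ l.map (fun c => String.singleton c) := by
  intro l
  induction l using pvStep.induct with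
  | case1 => intro _ out o d _; simp [pvTiltAux]
  | case2 c =>
    intro _ out o d hd
    by_cases hO : c = 'O'
    · subst hO
      rcases hd with rfl | hne
      · simp [pvTiltAux, List.replicate_succ', pvSingO]
      · simp at hne
    · by_cases hD : c = '.'
      · subst hD
        simp [pvTiltAux, hO, List.replicate_succ', List.append_assoc, pvSingD]
      · simp [pvTiltAux, hO, hD]
  | case3 c c2 t h ih =>
    obtain ⟨rfl, rfl⟩ := h
    intro hfix
    exfalso
    rw [pvStep, if_pos ⟨rfl, rfl⟩] at hfix
    exact absurd (List.head_eq_of_cons_eq hfix) (by decide)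
  | case4 c c2 t h ih =>
    intro hfix out o d hd
    rw [pvStep, if_neg h] at hfix
    have htail : pvStep (c2 :: t) = c2 :: t := List.tail_eq_of_cons_eq hfix
    by_cases hO : c = 'O'
    · subst hO
      rcases hd with rfl | hne
      · rw [pvTiltAux, if_pos rfl, ih htail out (o + 1) 0 (Or.inl rfl)]
        simp [List.replicate_succ', pvSingO]
      · simp at hne
    · by_cases hD : c = '.'
      · subst hD
        have hc2 : c2 ≠ 'O' := by rintro rfl; exact h ⟨rfl, rfl⟩
        rw [pvTiltAux, if_neg hO, if_pos rfl, ih htail out o (d + 1) (Or.inr (by simpa using hc2))]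
        simp [List.replicate_succ', pvSingD]
      · rw [pvTiltAux, if_neg hO, if_neg hD, ih htail _ 0 0 (Or.inl rfl)]
        simp

theorem pvLoopA_eq_aux : ∀ (n : Nat) (s : String), pvPot s.toList ≤ n →
    pvLoopA s = pvTiltAux [] 0 0 s.toList := by
  intro n
  induction n with
  | zero =>
    intro s hn
    rw [pvLoopA]
    have hfix : PySem.Str.replace s ".O" "O." = s := by
      by_contra hne
      have hlt : pvPot (pvStep s.toList) < pvPot s.toList :=
        pvPot_step_lt _ (fun he => hne (String.toList_inj.mp (by rw [pvReplace_eq_step, he])))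
      omega
    rw [if_pos hfix]
    have hstep : pvStep s.toList = s.toList := by rw [← pvReplace_eq_step, hfix]
    rw [pvTiltAux_fix s.toList hstep [] 0 0 (Or.inl rfl)]
    simp
  | succ n ih =>
    intro s hn
    rw [pvLoopA]
    by_cases hfix : PySem.Str.replace s ".O" "O." = s
    · rw [if_pos hfix]
      have hstep : pvStep s.toList = s.toList := by rw [← pvReplace_eq_step, hfix]
      rw [pvTiltAux_fix s.toList hstep [] 0 0 (Or.inl rfl)]
      simp
    · rw [if_neg hfix]
      have hlt : pvPot (pvStep s.toList) < pvPot s.toList :=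
        pvPot_step_lt _ (fun he => hfix (String.toList_inj.mp (by rw [pvReplace_eq_step, he])))
      rw [ih _ (by rw [pvReplace_eq_step]; omega)]
      rw [pvReplace_eq_step]
      exact pvTiltAux_step _ _ _ _

-- ===== VERDICT (by name: the statement is the Claim_ definition above) =====
theorem tilt_col_west_spec : Claim_equal_tilt_col_west := by
  intro row _
  show tilt_col_west row = tilt_col_west_alt row
  rw [tilt_col_west, tilt_col_west_alt]
  exact pvLoopA_eq_aux _ _ le_rfl
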